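-- pv_equiv track=rewrite | github.com/alirezaghey/solutions-to-data-structures-algorithms-python-goodrich | chapter1/projects/P-1.30.py | timesToDivideBinary
-- ===== SOURCE A (Python) =====
-- def timesToDivideBinary(n: int) -> int:
--     """
--     Using the fact that integers are hold in binary form
--     and that a binary right shift equals division by two
--     we will right shift n until n is less than two (only its least significant bit is set)
--     This approach is probably more efficient as bit operation are normally very easy to do
--     for computers, but it needs to be tested to make sure.
--     This algorithms time and space complexity does not change compared to the previous one.
--
--     Time complexity: O(log n)
--     Space complexity: O(1)
--     """
--     if n <= 2:
--         raise ValueError("Value must be greater than 2!")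
--     count = 0
--     while n | 1 != 1:
--         n >>= 1
--         count += 1
--     return count
-- ===== SOURCE B (Python) =====
-- def timesToDivideBinary(n: int) -> int:
--     if n <= 2:
--         raise ValueError("Value must be greater than 2!")
--     return n.bit_length() - 1
-- ===== Notes on version B (the rewrite author's own statement) =====
-- stated objective: idiomatic
-- what changed: Replaces the right-shift counting loop by the closed form n.bit_length() - 1 after the same n <= 2 guard.
import Mathlib
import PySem

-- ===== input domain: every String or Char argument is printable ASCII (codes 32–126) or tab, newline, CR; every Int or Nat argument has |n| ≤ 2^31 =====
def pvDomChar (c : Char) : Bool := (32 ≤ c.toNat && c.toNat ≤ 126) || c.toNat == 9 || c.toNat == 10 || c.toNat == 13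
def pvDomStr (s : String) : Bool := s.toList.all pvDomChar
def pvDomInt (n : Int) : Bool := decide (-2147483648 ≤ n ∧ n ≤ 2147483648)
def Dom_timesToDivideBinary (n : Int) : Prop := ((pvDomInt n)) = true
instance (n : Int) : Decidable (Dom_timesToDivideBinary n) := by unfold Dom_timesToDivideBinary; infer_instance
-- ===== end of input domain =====

-- B replaces A's right-shift counting loop by the closed form bit_length(n) - 1 (= Nat.log2) after the same n <= 2 guard (idiomatic, no loop).


-- ===== PORT A =====
-- Termination fact the loop cites: if m ||| 1 ≠ 1 then m ≥ 2, so m / 2 < m.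
theorem pvLoopA_dec (m : Nat) (h : m ||| 1 ≠ 1) : m / 2 < m := by
  match m with
  | 0 => exact absurd (by decide) h
  | 1 => exact absurd (by decide) h
  | k + 2 => omega

-- the while-loop of A: shift right, counting, until n | 1 == 1.
-- Inside Pre_ (n > 2) the Python int is positive, so the loop state is carried as a Nat.
def pvLoopA (m : Nat) (count : Int) : Int :=
  if h : m ||| 1 ≠ 1 then pvLoopA (m / 2) (count + 1) else count
termination_by m
decreasing_by exact pvLoopA_dec m h

def timesToDivideBinary (n : Int) : Int :=
  if n ≤ 2 then 0   -- Python raises ValueError here; excluded by Pre_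
  else pvLoopA n.toNat 0

-- ===== PORT B =====
def timesToDivideBinary_alt (n : Int) : Int :=
  if n ≤ 2 then 0   -- Python raises ValueError here; excluded by Pre_
  else ((Nat.log2 n.toNat : Nat) : Int)   -- n.bit_length() - 1 for n > 0 is Nat.log2

-- ===== PRECONDITION & SPEC =====
-- A raises ValueError for n ≤ 2; exactly those inputs are excluded.
def Pre_timesToDivideBinary (n : Int) : Prop := 2 < n
instance (n : Int) : Decidable (Pre_timesToDivideBinary n) := by unfold Pre_timesToDivideBinary; infer_instance
def pvWitness_timesToDivideBinary : Int := 7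

def Spec_timesToDivideBinary (n : Int) (out : Int) : Prop := out = timesToDivideBinary_alt n
instance (n : Int) (out : Int) : Decidable (Spec_timesToDivideBinary n out) := by unfold Spec_timesToDivideBinary; infer_instance

-- ===== CLAIM (what is proved, stated in full; the proofs are below) =====
def Claim_equal_timesToDivideBinary : Prop := ∀ (n : Int), Dom_timesToDivideBinary n → Pre_timesToDivideBinary n → Spec_timesToDivideBinary n (timesToDivideBinary n)

-- ===== LEMMAS AND PROOFS =====
-- loop characterisation: for m ≥ 1 the loop returns count + log2 m.
theorem pvLoopA_eq (m : Nat) : 1 ≤ m → ∀ count : Int, pvLoopA m count = count + (Nat.log2 m : Int) := by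
  induction m using Nat.strong_induction_on with
  | _ m ih =>
    intro hm count
    rw [pvLoopA]
    by_cases h : m ||| 1 ≠ 1
    · have h2 : 2 ≤ m := by
        match m with
        | 0 => exact absurd (by decide) h
        | 1 => exact absurd (by decide) h
        | k + 2 => omega
      rw [dif_pos h]
      rw [ih (m / 2) (pvLoopA_dec m h) (by omega) (count + 1)]
      conv_rhs => rw [Nat.log2_def, if_pos h2]
      push_cast
      ring
    · rw [not_not] at h
      have hle : m ≤ m ||| 1 := Nat.left_le_or
      have h1 : m = 1 := by omega
      subst h1
      simp

theorem timesToDivideBinary_spec : Claim_equal_timesToDivideBinary := by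
  intro n _ hpre
  unfold Spec_timesToDivideBinary timesToDivideBinary timesToDivideBinary_alt
  have hn : ¬ n ≤ 2 := by exact not_le.mpr hpre
  rw [if_neg hn, if_neg hn]
  rw [pvLoopA_eq n.toNat (by omega) 0]
  simp
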